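-- pv_equiv track=rewrite | github.com/MariaGabrielaReis/Python-for-Zombies | List-13/L13-ex002.py | x_antes
-- ===== SOURCE A (Python) =====
-- def x_antes(words):
--     comeca = []
--     nao_comeca = []
--
--     for word in words:
--         if word.startswith('x'):
--             comeca.append(word)
--         else:
--             nao_comeca.append(word)
--
--     return sorted(comeca) + sorted(nao_comeca)
-- ===== SOURCE B (Python) =====
-- def x_antes(words):
--     return sorted(words, key=lambda w: (not w.startswith('x'), w))
-- ===== Notes on version B (the rewrite author's own statement) =====
-- stated objective: idiomatic
-- what changed: Replaced A's partition-into-two-lists-then-two-sorts-then-concatenate with a single stable sort under the composite key (not w.startswith('x'), w).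
import Mathlib
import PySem

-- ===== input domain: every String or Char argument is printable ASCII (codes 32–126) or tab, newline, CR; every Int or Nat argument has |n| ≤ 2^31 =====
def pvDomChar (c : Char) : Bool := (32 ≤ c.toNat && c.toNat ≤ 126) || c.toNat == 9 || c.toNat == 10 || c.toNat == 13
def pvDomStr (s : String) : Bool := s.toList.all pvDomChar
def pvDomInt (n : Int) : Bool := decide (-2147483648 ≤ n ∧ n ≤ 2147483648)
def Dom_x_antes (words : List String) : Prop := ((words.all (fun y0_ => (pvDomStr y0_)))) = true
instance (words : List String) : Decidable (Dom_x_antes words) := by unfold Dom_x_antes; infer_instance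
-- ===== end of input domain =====

-- B replaces A's partition-then-sort-then-concatenate with a single stable sort under the
-- composite key (not startswith('x'), word); same output, more idiomatic.


-- ===== PORT A =====
-- literal port: partition into comeca/nao_comeca by startswith('x'), then sorted(comeca) + sorted(nao_comeca)
def x_antes (words : List String) : List String :=
  let pr := words.foldl
    (fun (acc : List String × List String) word =>
      if PySem.Str.startswith word "x" then (acc.1 ++ [word], acc.2) else (acc.1, acc.2 ++ [word]))
    ([], [])
  PySem.List.sorted pr.1 (fun w => w) ++ PySem.List.sorted pr.2 (fun w => w)

-- ===== PORT B =====
-- literal port of Source B: one stable sort with key (not w.startswith('x'), w)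
def x_antes_alt (words : List String) : List String :=
  PySem.List.sorted2 words (fun w => !PySem.Str.startswith w "x") (fun w => w)

-- ===== PRECONDITION & SPEC =====
def Spec_x_antes (words : List String) (out : List String) : Prop := out = x_antes_alt words
instance (words : List String) (out : List String) : Decidable (Spec_x_antes words out) := by unfold Spec_x_antes; infer_instance

-- ===== CLAIM (what is proved, stated in full; the proofs are below) =====
def Claim_equal_x_antes : Prop := ∀ (words : List String), Dom_x_antes words → Spec_x_antes words (x_antes words)

-- ===== LEMMAS AND PROOFS =====

-- the two-valued first key: the comparison sorted2 uses, specialised to k1 = !p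
def pvLt2 {α κ : Type} [LT κ] [DecidableLT κ] (p : α → Bool) (k : α → κ) (a b : α) : Bool :=
  decide ((!p a) < (!p b)) || !decide ((!p b) < (!p a)) && decide (k a < k b)

def pvLtk {α κ : Type} [LT κ] [DecidableLT κ] (k : α → κ) (a b : α) : Bool :=
  decide (k a < k b)

theorem pvInsertBy_congr {α : Type} (f g : α → α → Bool) (x : α) (ys : List α)
    (h : ∀ y ∈ ys, f x y = g x y) :
    PySem.List.insertBy f x ys = PySem.List.insertBy g x ys := by
  induction ys with
  | nil => rfl
  | cons y ys ih =>
    simp only [PySem.List.insertBy]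
    rw [h y (by simp)]
    split
    · rfl
    · rw [ih (fun z hz => h z (by simp [hz]))]

theorem pvLt2_eq_ltk {α κ : Type} [LT κ] [DecidableLT κ] (p : α → Bool) (k : α → κ) (a b : α)
    (h : p a = p b) : pvLt2 p k a b = pvLtk k a b := by
  cases hb : p b <;> simp [pvLt2, pvLtk, h, hb]

theorem pvInsert_left {α κ : Type} [LT κ] [DecidableLT κ] (p : α → Bool) (k : α → κ)
    (x : α) (hx : p x = true) (S1 S2 : List α)
    (h1 : ∀ a ∈ S1, p a = true) (h2 : ∀ a ∈ S2, p a = false) :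
    PySem.List.insertBy (pvLt2 p k) x (S1 ++ S2) = PySem.List.insertBy (pvLtk k) x S1 ++ S2 := by
  induction S1 with
  | nil =>
    simp only [List.nil_append]
    cases S2 with
    | nil => rfl
    | cons y ys =>
      have hy : p y = false := h2 y (by simp)
      simp [PySem.List.insertBy, pvLt2, hx, hy, Bool.lt_iff]
  | cons a s ih =>
    have ha : p a = true := h1 a (by simp)
    simp only [List.cons_append, PySem.List.insertBy]
    rw [pvLt2_eq_ltk p k x a (hx.trans ha.symm)]
    split
    · rfl
    · rw [ih (fun z hz => h1 z (by simp [hz]))]; simp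

theorem pvInsert_right {α κ : Type} [LT κ] [DecidableLT κ] (p : α → Bool) (k : α → κ)
    (x : α) (hx : p x = false) (S1 S2 : List α)
    (h1 : ∀ a ∈ S1, p a = true) (h2 : ∀ a ∈ S2, p a = false) :
    PySem.List.insertBy (pvLt2 p k) x (S1 ++ S2) = S1 ++ PySem.List.insertBy (pvLtk k) x S2 := by
  induction S1 with
  | nil =>
    simp only [List.nil_append]
    exact pvInsertBy_congr _ _ x S2 (fun y hy => pvLt2_eq_ltk p k x y (hx.trans (h2 y hy).symm))
  | cons a s ih =>
    have ha : p a = true := h1 a (by simp)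
    simp only [List.cons_append, PySem.List.insertBy]
    have : pvLt2 p k x a = false := by
      simp [pvLt2, hx, ha, Bool.lt_iff]
    rw [this]
    simp only [Bool.false_eq_true, if_false]
    rw [ih (fun z hz => h1 z (by simp [hz]))]

theorem pvMain {α κ : Type} [LT κ] [DecidableLT κ] (p : α → Bool) (k : α → κ)
    (xs : List α) : ∀ (S1 S2 : List α),
    (∀ a ∈ S1, p a = true) → (∀ a ∈ S2, p a = false) →
    xs.foldl (fun acc x => PySem.List.insertBy (pvLt2 p k) x acc) (S1 ++ S2) =
      (xs.filter p).foldl (fun acc x => PySem.List.insertBy (pvLtk k) x acc) S1 ++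
      (xs.filter (fun a => !p a)).foldl (fun acc x => PySem.List.insertBy (pvLtk k) x acc) S2 := by
  induction xs with
  | nil => intro S1 S2 _ _; simp
  | cons x xs ih =>
    intro S1 S2 h1 h2
    by_cases hx : p x = true
    · rw [List.foldl_cons, pvInsert_left p k x hx S1 S2 h1 h2,
        ih (PySem.List.insertBy (pvLtk k) x S1) S2
          (fun z hz => by
            rcases (PySem.List.mem_insertBy _ _ _ _).mp hz with h | h
            · exact h ▸ hx
            · exact h1 z h)
          h2]
      simp [hx]
    · have hx' : p x = false := by simp at hx; exact hx
      rw [List.foldl_cons, pvInsert_right p k x hx' S1 S2 h1 h2,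
        ih S1 (PySem.List.insertBy (pvLtk k) x S2) h1
          (fun z hz => by
            rcases (PySem.List.mem_insertBy _ _ _ _).mp hz with h | h
            · exact h ▸ hx'
            · exact h2 z h)]
      simp [hx']

-- the partition loop of A computes (filter p, filter !p)
theorem pvPartition (p : String → Bool) (xs : List String) : ∀ (c n : List String),
    xs.foldl (fun (acc : List String × List String) w =>
        if p w then (acc.1 ++ [w], acc.2) else (acc.1, acc.2 ++ [w])) (c, n) =
      (c ++ xs.filter p, n ++ xs.filter (fun w => !p w)) := by
  induction xs with
  | nil => intro c n; simp
  | cons x xs ih =>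
    intro c n
    by_cases hx : p x = true
    · simp [hx, ih]
    · have hx' : p x = false := by simp at hx; exact hx
      simp [hx', ih]

theorem pvSorted2_split {α κ : Type} [LT κ] [DecidableLT κ] (p : α → Bool) (k : α → κ)
    (xs : List α) :
    PySem.List.sorted2 xs (fun a => !p a) k =
      PySem.List.sorted (xs.filter p) k ++ PySem.List.sorted (xs.filter (fun a => !p a)) k := by
  rw [PySem.List.sorted_eq_foldl_insertBy, PySem.List.sorted_eq_foldl_insertBy]
  have := pvMain p k xs [] [] (by simp) (by simp)
  simp only [List.nil_append] at this
  exact this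

-- ===== VERDICT (by name: the statement is the Claim_ definition above) =====
theorem x_antes_spec : Claim_equal_x_antes := by
  intro words _
  unfold Spec_x_antes x_antes x_antes_alt
  rw [pvSorted2_split (fun w => PySem.Str.startswith w "x") (fun w => w) words,
    pvPartition (fun w => PySem.Str.startswith w "x") words [] []]
  simp
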